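-- pv_equiv track=rewrite | github.com/aryanranderiya/browser-automation | backend/utils/browser_utils.py | validate_selectors
-- ===== SOURCE A (Python) =====
-- from typing import Dict, List, Optional
--
-- def validate_selectors(selectors: List[str]) -> List[str]:
--     """Validate and fix common CSS selector issues"""
--     validated = []
--
--     for selector in selectors:
--         # Add basic validation/correction logic
--         selector = selector.strip()
--
--         # Fix missing quotes in attribute selectors
--         if "[" in selector and "]" in selector and "=" in selector:
--             parts = selector.split("[")
--             for i in range(1, len(parts)):
--                 if "]" in parts[i]:
--                     attr_part = parts[i].split("]")[0]
--                     if "=" in attr_part: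
--                         key, value = attr_part.split("=", 1)
--                         # If value is not quoted and contains non-alphanumeric chars, add quotes
--                         if not (value.startswith('"') or value.startswith("'")):
--                             if any(c for c in value if not (c.isalnum() or c == "-")):
--                                 value = f'"{value}"'
--                                 parts[i] = f"{key}={value}]{parts[i].split(']', 1)[1]}"
--
--             selector = "[".join(parts)
--
--         validated.append(selector)
--
--     return validated
-- ===== SOURCE B (Python) =====
-- # B: a single character-level finite-state machine per selector (states:
-- # outside / collecting-key / collecting-value) instead of A's guard +
-- # split('[') + index loop over a mutated parts list + join.
-- from typing import Dict, List, Optional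
--
--
-- def _quote_if_needed(v):
--     if v[:1] in ('"', "'"):
--         return v
--     if all(c.isalnum() or c == '-' for c in v):
--         return v
--     return '"' + v + '"'
--
--
-- def _fix(s):
--     out = []
--     mode, key, val = 0, '', ''  # 0 outside, 1 in key, 2 in value
--     for c in s:
--         if mode == 0:
--             out.append(c)
--             if c == '[':
--                 mode, key = 1, ''
--         elif mode == 1:
--             if c == '[':
--                 out.append(key)
--                 out.append(c)
--                 key = ''
--             elif c == '=':
--                 mode, val = 2, ''
--             elif c == ']':
--                 out.append(key)
--                 out.append(c)
--                 mode = 0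
--             else:
--                 key += c
--         else:
--             if c == '[':
--                 out.append(key + '=' + val)
--                 out.append(c)
--                 mode, key = 1, ''
--             elif c == ']':
--                 out.append(key + '=' + _quote_if_needed(val) + c)
--                 mode = 0
--             else:
--                 val += c
--     if mode == 1:
--         out.append(key)
--     elif mode == 2:
--         out.append(key + '=' + val)
--     return ''.join(out)
--
--
-- def validate_selectors(selectors: List[str]) -> List[str]:
--     return [_fix(s.strip()) for s in selectors]
-- ===== Notes on version B (the rewrite author's own statement) =====
-- stated objective: alternative
-- what changed: Replaces A's containment guard plus split('[') / index loop mutating a parts list / '['.join with a single character-level finite-state machine per selector (states outside / key / value with explicit buffers) that emits the fixed selector in one pass.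
import Mathlib
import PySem

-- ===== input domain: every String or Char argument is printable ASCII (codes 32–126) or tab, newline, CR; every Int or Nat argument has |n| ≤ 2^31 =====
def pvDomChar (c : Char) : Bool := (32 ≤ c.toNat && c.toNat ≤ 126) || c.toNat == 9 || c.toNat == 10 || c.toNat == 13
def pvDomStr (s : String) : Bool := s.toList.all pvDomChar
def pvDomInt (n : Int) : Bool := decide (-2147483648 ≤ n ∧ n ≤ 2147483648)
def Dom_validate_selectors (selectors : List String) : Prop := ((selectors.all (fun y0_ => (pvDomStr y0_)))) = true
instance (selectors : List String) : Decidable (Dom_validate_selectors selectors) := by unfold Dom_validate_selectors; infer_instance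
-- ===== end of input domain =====

-- B replaces A's containment guard + split('[') + index loop over a mutated parts
-- list + join with a single character-level finite-state machine per selector
-- (states outside / key / value with explicit buffers), one pass, same return value.

-- ===== PORT A =====
def validate_selectors (selectors : List String) : List String :=
  selectors.foldl (fun validated selector =>
    let sel := PySem.Chars.strip selector.toList
    let sel :=
      if PySem.Chars.isIn ['['] sel && PySem.Chars.isIn [']'] sel && PySem.Chars.isIn ['='] sel then
        let parts := PySem.Chars.splitOn sel ['[']
        let parts := (PySem.List.pyRange 1 (parts.length : Int) 1).foldl (fun parts i =>
          let part := PySem.List.pyGetD parts i []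
          if PySem.Chars.isIn [']'] part then
            let attr_part := PySem.List.pyGetD (PySem.Chars.splitOn part [']']) 0 []
            if PySem.Chars.isIn ['='] attr_part then
              let key := PySem.List.pyGetD (PySem.Chars.splitOnMax attr_part ['='] 1) 0 []
              let value := PySem.List.pyGetD (PySem.Chars.splitOnMax attr_part ['='] 1) 1 []
              if !(PySem.Chars.startswith value ['"'] || PySem.Chars.startswith value ['\'']) then
                if value.any (fun c => !(PySem.Chars.isalnum c || c == '-')) then
                  let value := ['"'] ++ value ++ ['"']
                  parts.set i.toNat (key ++ ['='] ++ value ++ ([']'] ++ PySem.List.pyGetD (PySem.Chars.splitOnMax part [']'] 1) 1 []))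
                else parts
              else parts
            else parts
          else parts) parts
        PySem.Chars.join ['['] parts
      else sel
    validated ++ [String.mk sel]) []

-- ===== PORT B =====
-- _quote_if_needed(v)
def quoteIfNeededB (v : List Char) : List Char :=
  if v.take 1 = ['"'] ∨ v.take 1 = ['\''] then v
  else if v.all (fun c => PySem.Chars.isalnum c || c == '-') then v
  else ['"'] ++ v ++ ['"']

-- the body of _fix's for-loop: state = (out, mode, key, val); mode 0 outside, 1 key, 2 value
def fsmStepB (st : List Char × Nat × List Char × List Char) (c : Char) :
    List Char × Nat × List Char × List Char :=
  let out := st.1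
  let mode := st.2.1
  let key := st.2.2.1
  let val := st.2.2.2
  if mode = 0 then
    if c = '[' then (out ++ [c], 1, [], val) else (out ++ [c], 0, key, val)
  else if mode = 1 then
    if c = '[' then (out ++ key ++ [c], 1, [], val)
    else if c = '=' then (out, 2, key, [])
    else if c = ']' then (out ++ key ++ [c], 0, key, val)
    else (out, 1, key ++ [c], val)
  else
    if c = '[' then (out ++ key ++ ['='] ++ val ++ [c], 1, [], val)
    else if c = ']' then (out ++ key ++ ['='] ++ quoteIfNeededB val ++ [c], 0, key, val)
    else (out, 2, key, val ++ [c])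

-- the flush after the loop
def fsmFinishB (st : List Char × Nat × List Char × List Char) : List Char :=
  if st.2.1 = 1 then st.1 ++ st.2.2.1
  else if st.2.1 = 2 then st.1 ++ st.2.2.1 ++ ['='] ++ st.2.2.2
  else st.1

-- _fix(s)
def fixB (s : List Char) : List Char := fsmFinishB (s.foldl fsmStepB ([], 0, [], []))

def validate_selectors_alt (selectors : List String) : List String :=
  selectors.map (fun s => String.mk (fixB (PySem.Chars.strip s.toList)))

-- ===== PRECONDITION & SPEC =====
def Spec_validate_selectors (selectors : List String) (out : List String) : Prop := out = validate_selectors_alt selectors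
instance (selectors : List String) (out : List String) : Decidable (Spec_validate_selectors selectors out) := by unfold Spec_validate_selectors; infer_instance

-- ===== CLAIM (what is proved, stated in full; the proofs are below) =====
def Claim_equal_validate_selectors : Prop := ∀ (selectors : List String), Dom_validate_selectors selectors → Spec_validate_selectors selectors (validate_selectors selectors)

-- ===== LEMMAS AND PROOFS =====

-- proof-side reference function: split on one character
def splitChar (c : Char) : List Char → List (List Char)
  | [] => [[]]
  | a :: t => if a = c then [] :: splitChar c t else (splitChar c t).modifyHead (a :: ·)

-- A's loop body as a named function (definitionally the lambda inside validate_selectors)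
def stepA (parts : List (List Char)) (i : Int) : List (List Char) :=
  let part := PySem.List.pyGetD parts i []
  if PySem.Chars.isIn [']'] part then
    let attr_part := PySem.List.pyGetD (PySem.Chars.splitOn part [']']) 0 []
    if PySem.Chars.isIn ['='] attr_part then
      let key := PySem.List.pyGetD (PySem.Chars.splitOnMax attr_part ['='] 1) 0 []
      let value := PySem.List.pyGetD (PySem.Chars.splitOnMax attr_part ['='] 1) 1 []
      if !(PySem.Chars.startswith value ['"'] || PySem.Chars.startswith value ['\'']) then
        if value.any (fun c => !(PySem.Chars.isalnum c || c == '-')) then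
          let value := ['"'] ++ value ++ ['"']
          parts.set i.toNat (key ++ ['='] ++ value ++ ([']'] ++ PySem.List.pyGetD (PySem.Chars.splitOnMax part [']'] 1) 1 []))
        else parts
      else parts
    else parts
  else parts

-- A's per-part transformation, extracted from the loop body
def fixPartA (part : List Char) : List Char :=
  if PySem.Chars.isIn [']'] part then
    let attr_part := PySem.List.pyGetD (PySem.Chars.splitOn part [']']) 0 []
    if PySem.Chars.isIn ['='] attr_part then
      let key := PySem.List.pyGetD (PySem.Chars.splitOnMax attr_part ['='] 1) 0 []
      let value := PySem.List.pyGetD (PySem.Chars.splitOnMax attr_part ['='] 1) 1 []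
      if !(PySem.Chars.startswith value ['"'] || PySem.Chars.startswith value ['\'']) then
        if value.any (fun c => !(PySem.Chars.isalnum c || c == '-')) then
          let value := ['"'] ++ value ++ ['"']
          key ++ ['='] ++ value ++ ([']'] ++ PySem.List.pyGetD (PySem.Chars.splitOnMax part [']'] 1) 1 [])
        else part
      else part
    else part
  else part

-- A's per-selector body, extracted
def coreA (sel : List Char) : List Char :=
  if PySem.Chars.isIn ['['] sel && PySem.Chars.isIn [']'] sel && PySem.Chars.isIn ['='] sel then
    let parts := PySem.Chars.splitOn sel ['[']
    let parts := (PySem.List.pyRange 1 (parts.length : Int) 1).foldl stepA parts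
    PySem.Chars.join ['['] parts
  else sel

theorem validate_selectors_eq_core (selectors : List String) :
    validate_selectors selectors =
      selectors.foldl (fun validated selector => validated ++ [String.mk (coreA (PySem.Chars.strip selector.toList))]) [] := rfl

-- proof-side normal form of the per-segment fix (one '['-delimited segment)
def fixSeg (seg : List Char) : List Char :=
  if ']' ∈ seg then
    if '=' ∈ seg.takeWhile (· ≠ ']') then
      let attr := seg.takeWhile (· ≠ ']')
      let rest := (seg.dropWhile (· ≠ ']')).tail
      let key := attr.takeWhile (· ≠ '=')
      let value := (attr.dropWhile (· ≠ '=')).tail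
      key ++ ['='] ++ quoteIfNeededB value ++ [']'] ++ rest
    else seg
  else seg

-- proof-side reference automaton: the three states of B's machine as mutual recursion
mutual
def goOut : List Char → List Char
  | [] => []
  | c :: t => if c = '[' then c :: goKey [] t else c :: goOut t
termination_by s => s.length

def goKey (k : List Char) : List Char → List Char
  | [] => k
  | c :: t =>
    if c = '[' then k ++ c :: goKey [] t
    else if c = '=' then goVal k [] t
    else if c = ']' then k ++ c :: goOut t
    else goKey (k ++ [c]) t
termination_by s => s.length

def goVal (k v : List Char) : List Char → List Char
  | [] => k ++ ['='] ++ v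
  | c :: t =>
    if c = '[' then k ++ ['='] ++ v ++ c :: goKey [] t
    else if c = ']' then k ++ ['='] ++ quoteIfNeededB v ++ c :: goOut t
    else goVal k (v ++ [c]) t
termination_by s => s.length
end

-- the continuation after the current segment
def tailCont (s : List Char) : List Char :=
  if '[' ∈ s then '[' :: goKey [] ((s.dropWhile (· ≠ '[')).tail) else []

-- ---------- generic char-list facts ----------

theorem findgo_singleton (c : Char) (s : List Char) (k : Nat) :
    PySem.Chars.find.go [c] s k =
      if c ∈ s then ((k : Int) + ((s.takeWhile (· ≠ c)).length : Int)) else -1 := by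
  induction s generalizing k with
  | nil => simp [PySem.Chars.find.go]
  | cons a t ih =>
    by_cases hac : a = c
    · subst hac
      simp [PySem.Chars.find.go, List.isPrefixOf]
    · have hpre : ([c].isPrefixOf (a :: t)) = false := by
        simp [List.isPrefixOf]; exact fun h => (hac h.symm).elim
      rw [show PySem.Chars.find.go [c] (a :: t) k
            = if [c].isPrefixOf (a :: t) then (k : Int) else PySem.Chars.find.go [c] t (k+1) from rfl]
      rw [hpre]
      simp only [Bool.false_eq_true, if_false, ih]
      have hmem : (c ∈ a :: t) ↔ (c ∈ t) := by
        simp [List.mem_cons]; intro h; exact (hac h.symm).elim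
      by_cases hct : c ∈ t
      · rw [if_pos hct, if_pos (hmem.mpr hct)]
        rw [List.takeWhile_cons, if_pos (by simp [hac])]
        simp only [List.length_cons]
        push_cast
        ring
      · rw [if_neg hct, if_neg (fun h => hct (hmem.mp h))]

theorem find_singleton (c : Char) (s : List Char) :
    PySem.Chars.find s [c] =
      if c ∈ s then (((s.takeWhile (· ≠ c)).length : Int)) else -1 := by
  have := findgo_singleton c s 0
  simpa [PySem.Chars.find] using this

theorem isIn_singleton (c : Char) (s : List Char) :
    PySem.Chars.isIn [c] s = decide (c ∈ s) := by
  simp only [PySem.Chars.isIn, find_singleton]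
  by_cases h : c ∈ s <;> simp [h]

theorem takeWhile_append_all (p : Char → Bool) (k l : List Char) (hk : ∀ a ∈ k, p a) :
    (k ++ l).takeWhile p = k ++ l.takeWhile p := by
  induction k with
  | nil => simp
  | cons a t ih =>
    have ha : p a := hk a List.mem_cons_self
    simp only [List.cons_append, List.takeWhile_cons, ha, if_true]
    rw [ih (fun b hb => hk b (List.mem_cons_of_mem _ hb))]

theorem dropWhile_append_all (p : Char → Bool) (k l : List Char) (hk : ∀ a ∈ k, p a) :
    (k ++ l).dropWhile p = l.dropWhile p := by
  induction k with
  | nil => simp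
  | cons a t ih =>
    have ha : p a := hk a List.mem_cons_self
    simp only [List.cons_append, List.dropWhile_cons, ha, if_true]
    exact ih (fun b hb => hk b (List.mem_cons_of_mem _ hb))

theorem reconstruct_mem (a : Char) (l : List Char) (h : a ∈ l) :
    l = l.takeWhile (· ≠ a) ++ a :: (l.dropWhile (· ≠ a)).tail := by
  induction l with
  | nil => simp at h
  | cons b t ih =>
    by_cases hba : b = a
    · subst hba
      simp [List.takeWhile_cons, List.dropWhile_cons]
    · have hat : a ∈ t := by
        rcases List.mem_cons.mp h with h' | h'
        · exact (hba h'.symm).elim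
        · exact h'
      simp only [List.takeWhile_cons, List.dropWhile_cons, if_pos (by simp [hba] : (decide (b ≠ a)) = true)]
      conv_lhs => rw [ih hat]
      simp

theorem splitChar_ne_nil (c : Char) (s : List Char) : splitChar c s ≠ [] := by
  induction s with
  | nil => simp [splitChar]
  | cons a t ih =>
    by_cases h : a = c <;> simp [splitChar, h]
    cases htc : splitChar c t with
    | nil => exact (ih htc).elim
    | cons x xs => simp

theorem splitChar_cons_of_mem (c : Char) (s : List Char) (h : c ∈ s) :
    splitChar c s = s.takeWhile (· ≠ c) :: splitChar c ((s.dropWhile (· ≠ c)).tail) := by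
  induction s with
  | nil => simp at h
  | cons a t ih =>
    by_cases hac : a = c
    · subst hac
      simp [splitChar, List.takeWhile_cons, List.dropWhile_cons]
    · have hct : c ∈ t := by
        rcases List.mem_cons.mp h with h' | h'
        · exact (hac h'.symm).elim
        · exact h'
      simp only [splitChar, if_neg hac, ih hct]
      simp [List.takeWhile_cons, List.dropWhile_cons, hac]

theorem splitChar_of_not_mem (c : Char) (s : List Char) (h : c ∉ s) :
    splitChar c s = [s] := by
  induction s with
  | nil => rfl
  | cons a t ih =>
    have hac : ¬ a = c := fun he => h (he ▸ List.mem_cons_self)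
    have hct : c ∉ t := fun hm => h (List.mem_cons_of_mem _ hm)
    simp [splitChar, hac, ih hct]

theorem splitOngo_singleton (c : Char) (l cur : List Char) (acc : List (List Char))
    (fuel : Nat) (hf : l.length < fuel) :
    PySem.Chars.splitOn.go [c] fuel l cur acc =
      acc.reverse ++ (splitChar c l).modifyHead (cur.reverse ++ ·) := by
  induction fuel generalizing l cur acc with
  | zero => omega
  | succ n ih =>
    cases l with
    | nil => simp [PySem.Chars.splitOn.go, splitChar]
    | cons a t =>
      by_cases hac : a = c
      · subst hac
        have hpre : ([a].isPrefixOf (a :: t)) = true := by simp [List.isPrefixOf]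
        rw [show PySem.Chars.splitOn.go [a] (n+1) (a :: t) cur acc
              = if [a].isPrefixOf (a :: t) then PySem.Chars.splitOn.go [a] n (List.drop [a].length (a :: t)) [] (cur.reverse :: acc)
                else PySem.Chars.splitOn.go [a] n t (a :: cur) acc from rfl]
        rw [hpre]
        simp only [if_true, List.length_cons, List.length_nil, Nat.zero_add, List.drop_succ_cons, List.drop_zero]
        rw [ih t [] (cur.reverse :: acc) (by simp at hf ⊢; omega)]
        simp only [splitChar, List.reverse_cons, List.reverse_nil, List.nil_append, if_pos rfl]
        cases h : splitChar a t with
        | nil => exact (splitChar_ne_nil a t h).elim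
        | cons x xs => simp
      · have hpre : ([c].isPrefixOf (a :: t)) = false := by
          simp [List.isPrefixOf]; exact fun h => (hac h.symm).elim
        rw [show PySem.Chars.splitOn.go [c] (n+1) (a :: t) cur acc
              = if [c].isPrefixOf (a :: t) then PySem.Chars.splitOn.go [c] n (List.drop [c].length (a :: t)) [] (cur.reverse :: acc)
                else PySem.Chars.splitOn.go [c] n t (a :: cur) acc from rfl]
        rw [hpre]
        simp only [Bool.false_eq_true, if_false]
        rw [ih t (a :: cur) acc (by simp at hf ⊢; omega)]
        simp only [splitChar, if_neg hac, List.modifyHead_modifyHead]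
        congr 2
        funext x
        simp

theorem splitOn_singleton (c : Char) (s : List Char) :
    PySem.Chars.splitOn s [c] = splitChar c s := by
  unfold PySem.Chars.splitOn
  rw [splitOngo_singleton c s [] [] (s.length + 1) (by omega)]
  simp only [List.reverse_nil, List.nil_append]
  cases h : splitChar c s with
  | nil => exact (splitChar_ne_nil c s h).elim
  | cons x xs => simp

theorem splitOnMaxgo_zero (c : Char) (l cur : List Char) (acc : List (List Char))
    (fuel : Nat) (hf : l.length < fuel) :
    PySem.Chars.splitOnMax.go [c] fuel 0 l cur acc = acc.reverse ++ [cur.reverse ++ l] := by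
  cases fuel with
  | zero => omega
  | succ n =>
    cases l with
    | nil => simp [PySem.Chars.splitOnMax.go]
    | cons a t => simp [PySem.Chars.splitOnMax.go]

theorem splitOnMaxgo_one (c : Char) (l cur : List Char) (acc : List (List Char))
    (fuel : Nat) (hf : l.length < fuel) :
    PySem.Chars.splitOnMax.go [c] fuel 1 l cur acc =
      acc.reverse ++
        (if c ∈ l then [cur.reverse ++ l.takeWhile (· ≠ c), (l.dropWhile (· ≠ c)).tail]
         else [cur.reverse ++ l]) := by
  induction fuel generalizing l cur acc with
  | zero => omega
  | succ n ih =>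
    cases l with
    | nil => simp [PySem.Chars.splitOnMax.go]
    | cons a t =>
      rw [show PySem.Chars.splitOnMax.go [c] (n+1) 1 (a :: t) cur acc
            = if (1:Nat) = 0 then ((cur.reverse ++ (a :: t)) :: acc).reverse
              else if [c].isPrefixOf (a :: t)
                then PySem.Chars.splitOnMax.go [c] n 0 (List.drop [c].length (a :: t)) [] (cur.reverse :: acc)
                else PySem.Chars.splitOnMax.go [c] n 1 t (a :: cur) acc from rfl]
      simp only [Nat.one_ne_zero, if_false]
      by_cases hac : a = c
      · subst hac
        have hpre : ([a].isPrefixOf (a :: t)) = true := by simp [List.isPrefixOf]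
        rw [hpre]
        simp only [if_true, List.length_cons, List.length_nil, Nat.zero_add, List.drop_succ_cons, List.drop_zero]
        rw [splitOnMaxgo_zero a t [] (cur.reverse :: acc) n (by simp at hf ⊢; omega)]
        simp [List.takeWhile_cons, List.dropWhile_cons]
      · have hpre : ([c].isPrefixOf (a :: t)) = false := by
          simp [List.isPrefixOf]; exact fun h => (hac h.symm).elim
        rw [hpre]
        simp only [Bool.false_eq_true, if_false]
        rw [ih t (a :: cur) acc (by simp at hf ⊢; omega)]
        have hmem : (c ∈ a :: t) ↔ (c ∈ t) := by
          simp [List.mem_cons]; intro h; exact (hac h.symm).elim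
        by_cases hct : c ∈ t
        · rw [if_pos hct, if_pos (hmem.mpr hct)]
          simp [List.takeWhile_cons, List.dropWhile_cons, hac]
        · rw [if_neg hct, if_neg (fun h => hct (hmem.mp h))]
          simp

theorem splitOnMax_one_singleton (c : Char) (s : List Char) :
    PySem.Chars.splitOnMax s [c] 1 =
      if c ∈ s then [s.takeWhile (· ≠ c), (s.dropWhile (· ≠ c)).tail] else [s] := by
  rw [show PySem.Chars.splitOnMax s [c] 1
        = if (1:Int) < 0 then PySem.Chars.splitOn s [c]
          else PySem.Chars.splitOnMax.go [c] (s.length + 1) (Int.toNat 1) s [] [] from rfl]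
  norm_num
  rw [splitOnMaxgo_one c s [] [] (s.length + 1) (by omega)]
  by_cases h : c ∈ s <;> simp [h]

theorem startswith_singleton (v : List Char) (q : Char) :
    PySem.Chars.startswith v [q] = decide (v.take 1 = [q]) := by
  cases v with
  | nil => simp [PySem.Chars.startswith, List.isPrefixOf]
  | cons a t =>
    by_cases haq : a = q
    · subst haq
      simp [PySem.Chars.startswith, List.isPrefixOf]
    · have h1 : (q == a) = false := beq_eq_false_iff_ne.mpr (Ne.symm haq)
      simp [PySem.Chars.startswith, List.isPrefixOf, h1, haq]

theorem any_not_eq_not_all (v : List Char) (p : Char → Bool) :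
    (v.any fun c => !(p c)) = !(v.all p) := by
  induction v with
  | nil => rfl
  | cons a t ih => simp [List.any_cons, List.all_cons, ih]

-- ---------- A's per-part fix equals fixSeg ----------

theorem fixPartA_eq_fixSeg (seg : List Char) : fixPartA seg = fixSeg seg := by
  unfold fixPartA fixSeg
  rw [isIn_singleton]
  by_cases hr : ']' ∈ seg
  · simp only [hr, decide_true, if_true]
    rw [splitOn_singleton, splitChar_cons_of_mem _ _ hr]
    have hget0 : ∀ (x : List Char) (xs : List (List Char)),
        PySem.List.pyGetD (x :: xs) 0 [] = x := by
      intro x xs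
      rw [PySem.List.pyGetD_eq_getElem _ _ (by norm_num) (by simp)]
      rfl
    rw [hget0, isIn_singleton]
    set attr := seg.takeWhile (· ≠ ']') with hattr
    by_cases he : '=' ∈ attr
    · simp only [he, decide_true, if_true]
      rw [splitOnMax_one_singleton, splitOnMax_one_singleton, if_pos he, if_pos hr]
      have hget1 : ∀ (x y : List Char), PySem.List.pyGetD [x, y] 1 [] = y := by
        intro x y
        rw [PySem.List.pyGetD_eq_getElem _ _ (by norm_num) (by simp)]
        rfl
      rw [hget0, hget1, hget1]
      rw [startswith_singleton, startswith_singleton]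
      set value := (attr.dropWhile (· ≠ '=')).tail with hvalue
      set rest := (seg.dropWhile (· ≠ ']')).tail with hrest
      set key := attr.takeWhile (· ≠ '=') with hkey
      have hseg : seg = attr ++ ']' :: rest := by
        rw [hattr, hrest]; exact reconstruct_mem ']' seg hr
      have hattr2 : attr = key ++ '=' :: value := by
        rw [hkey, hvalue]; exact reconstruct_mem '=' attr he
      unfold quoteIfNeededB
      by_cases hq : value.take 1 = ['"'] ∨ value.take 1 = ['\'']
      · have hbq : (decide (value.take 1 = ['"']) || decide (value.take 1 = ['\''])) = true := by
          rcases hq with h | h <;> simp [h]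
        rw [hbq]
        simp only [Bool.not_true, Bool.false_eq_true, if_false, if_pos hq]
        conv_lhs => rw [hseg, hattr2]
        simp
      · push Not at hq
        have hbq : (decide (value.take 1 = ['"']) || decide (value.take 1 = ['\''])) = false := by
          simp [hq.1, hq.2]
        rw [hbq]
        simp only [Bool.not_false, if_true, if_neg (not_or.mpr ⟨hq.1, hq.2⟩)]
        rw [any_not_eq_not_all]
        by_cases hall : value.all (fun c => PySem.Chars.isalnum c || c == '-') = true
        · rw [hall]
          simp only [Bool.not_true, Bool.false_eq_true, if_false, if_pos hall]
          conv_lhs => rw [hseg, hattr2]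
          simp
        · have hallf : value.all (fun c => PySem.Chars.isalnum c || c == '-') = false :=
            Bool.eq_false_iff.mpr hall
          rw [hallf]
          simp only [Bool.not_false, if_true, if_neg hall]
          simp [List.append_assoc]
    · simp only [he, decide_false, if_neg he, Bool.false_eq_true, if_false]
  · simp only [hr, decide_false, if_neg hr, Bool.false_eq_true, if_false]

theorem set_getElem_self' (l : List (List Char)) (j : Nat) (h : j < l.length) :
    l.set j (l[j]'h) = l := List.set_getElem_self h

theorem stepA_eq_set (l : List (List Char)) (j : Nat) (h : j < l.length) :
    stepA l (j : Int) = l.set j (fixPartA (l[j]'h)) := by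
  unfold stepA fixPartA
  rw [PySem.List.pyGetD_eq_getElem _ _ (by positivity) (by exact_mod_cast h)]
  simp only [Int.toNat_natCast]
  split_ifs <;> simp [set_getElem_self' l j h]

theorem loop_maps (xs : List (List Char)) (m : Nat) (h1 : 1 ≤ m) (h2 : m ≤ xs.length) :
    (PySem.List.pyRange 1 (m : Int) 1).foldl stepA xs =
      xs.take 1 ++ ((xs.drop 1).take (m - 1)).map fixPartA ++ xs.drop m := by
  induction m with
  | zero => omega
  | succ n ih =>
    cases Nat.eq_or_lt_of_le h1 with
    | inl h =>
      have hn : n = 0 := by omega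
      subst hn
      have hr : PySem.List.pyRange 1 ((1:Nat) : Int) 1 = [] := by decide
      rw [hr]
      simp only [List.foldl_nil, Nat.add_sub_cancel, List.take_zero, List.map_nil,
        List.append_nil]
      cases xs with
      | nil => simp at h2
      | cons a t => simp
    | inr h =>
      have hn1 : 1 ≤ n := by omega
      have hxlen : n < xs.length := by omega
      have hrange : PySem.List.pyRange 1 ((n+1 : Nat) : Int) 1 = PySem.List.pyRange 1 (n : Int) 1 ++ [(n : Int)] := by
        push_cast
        exact PySem.List.pyRange_one_succ_right (by exact_mod_cast hn1)
      rw [hrange, List.foldl_append, ih hn1 (by omega)]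
      set A := xs.take 1 with hA
      set B := ((xs.drop 1).take (n - 1)).map fixPartA with hB
      have hAlen : A.length = 1 := by
        rw [hA]; simp; omega
      have hBlen : B.length = n - 1 := by
        rw [hB]; simp [List.length_take]; omega
      have hClen : (xs.drop n).length = xs.length - n := by simp
      rw [List.foldl_cons, List.foldl_nil]
      have hlt : n < (A ++ B ++ xs.drop n).length := by
        simp only [List.length_append, hAlen, hBlen, hClen]; omega
      rw [stepA_eq_set _ n hlt]
      have hval : (A ++ B ++ xs.drop n)[n]'hlt = xs[n]'hxlen := by
        rw [List.getElem_append_right (by simp only [List.length_append, hAlen, hBlen]; omega)]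
        rw [List.getElem_drop]
        congr 1
        simp only [List.length_append, hAlen, hBlen]
        omega
      rw [hval]
      rw [List.set_append_right _ _ (by simp only [List.length_append, hAlen, hBlen]; omega)]
      rw [List.drop_eq_getElem_cons hxlen]
      have hidx : n - (A ++ B).length = 0 := by
        simp only [List.length_append, hAlen, hBlen]; omega
      rw [hidx]
      simp only [List.set_cons_zero]
      have hn' : n - 1 + 1 = n := by omega
      have htake : (xs.drop 1).take n = (xs.drop 1).take (n - 1) ++ [xs[n]'hxlen] := by
        conv_lhs => rw [← hn']
        rw [List.take_succ]
        congr 1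
        have hget : (List.drop 1 xs)[n-1]? = xs[n]? := by
          rw [List.getElem?_drop]; congr 1; omega
        rw [hget, List.getElem?_eq_getElem hxlen]
        rfl
      rw [Nat.add_sub_cancel, htake, List.map_append]
      simp only [List.map_cons, List.map_nil, List.append_assoc, List.singleton_append,
        List.cons_append, List.nil_append]
      rfl

theorem join_splitChar (c : Char) (s : List Char) :
    PySem.Chars.join [c] (splitChar c s) = s := by
  induction s with
  | nil => simp [splitChar, PySem.Chars.join_singleton]
  | cons a t ih =>
    by_cases hac : a = c
    · subst hac
      rw [show splitChar a (a :: t) = [] :: splitChar a t from by simp [splitChar]]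
      cases h : splitChar a t with
      | nil => exact (splitChar_ne_nil a t h).elim
      | cons y ys =>
        rw [PySem.Chars.join_cons_cons, ← h, ih]
        simp
    · rw [show splitChar c (a :: t) = (splitChar c t).modifyHead (a :: ·) from by
        simp [splitChar, hac]]
      cases h : splitChar c t with
      | nil => exact (splitChar_ne_nil c t h).elim
      | cons y ys =>
        cases ys with
        | nil =>
          have hyt : y = t := by
            have h2 : PySem.Chars.join [c] [y] = t := h ▸ ih
            rwa [PySem.Chars.join_singleton] at h2
          rw [List.modifyHead_cons, PySem.Chars.join_singleton, hyt]
        | cons z zs =>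
          rw [List.modifyHead_cons, PySem.Chars.join_cons_cons]
          have : PySem.Chars.join [c] (y :: z :: zs) = t := h ▸ ih
          rw [PySem.Chars.join_cons_cons] at this
          simp [← this]

theorem splitChar_chars_subset (c : Char) (s : List Char) :
    ∀ x ∈ splitChar c s, ∀ a ∈ x, a ∈ s := by
  induction s with
  | nil =>
    intro x hx a ha
    simp [splitChar] at hx
    subst hx
    simp at ha
  | cons b t ih =>
    intro x hx a ha
    by_cases hbc : b = c
    · subst hbc
      rw [show splitChar b (b :: t) = [] :: splitChar b t from by simp [splitChar]] at hx
      rcases List.mem_cons.mp hx with rfl | hx'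
      · simp at ha
      · exact List.mem_cons_of_mem _ (ih x hx' a ha)
    · rw [show splitChar c (b :: t) = (splitChar c t).modifyHead (b :: ·) from by
        simp [splitChar, hbc]] at hx
      cases h : splitChar c t with
      | nil => exact (splitChar_ne_nil c t h).elim
      | cons y ys =>
        rw [h, List.modifyHead_cons] at hx
        rcases List.mem_cons.mp hx with rfl | hx'
        · rcases List.mem_cons.mp ha with rfl | ha'
          · exact List.mem_cons_self
          · exact List.mem_cons_of_mem _ (ih y (h ▸ List.mem_cons_self) a ha')
        · exact List.mem_cons_of_mem _ (ih x (h ▸ List.mem_cons_of_mem _ hx') a ha)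

theorem fixSeg_of_no_rb (seg : List Char) (h : ']' ∉ seg) : fixSeg seg = seg := by
  rw [fixSeg, if_neg h]

theorem fixSeg_of_no_eq (seg : List Char) (h : '=' ∉ seg) : fixSeg seg = seg := by
  rw [fixSeg]
  by_cases hr : ']' ∈ seg
  · rw [if_pos hr, if_neg (fun hm => h ((List.takeWhile_prefix _).subset hm))]
  · rw [if_neg hr]

-- ---------- the automaton computes segment-wise fixSeg ----------

theorem notRB (k : List Char) (hk : ∀ a ∈ k, a ≠ '[' ∧ a ≠ ']' ∧ a ≠ '=') : ']' ∉ k :=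
  fun hm => (hk _ hm).2.1 rfl

theorem notEQ (k : List Char) (hk : ∀ a ∈ k, a ≠ '[' ∧ a ≠ ']' ∧ a ≠ '=') : '=' ∉ k :=
  fun hm => (hk _ hm).2.2 rfl

theorem takeWhile_all_id (p : Char → Bool) (l : List Char) (h : ∀ a ∈ l, p a) :
    l.takeWhile p = l := by
  simpa using takeWhile_append_all p l [] h

theorem dropWhile_ne_nil_of_mem (a : Char) (l : List Char) (h : a ∈ l) :
    l.dropWhile (· ≠ a) ≠ [] := by
  induction l with
  | nil => simp at h
  | cons b t ih =>
    rw [List.dropWhile_cons]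
    by_cases hba : b = a
    · simp [hba]
    · rw [if_pos (by simp [hba])]
      exact ih (by
        rcases List.mem_cons.mp h with h' | h'
        · exact (hba h'.symm).elim
        · exact h')

theorem tailCont_cons (c : Char) (t : List Char) (h : c ≠ '[') :
    tailCont (c :: t) = tailCont t := by
  unfold tailCont
  have hm : ('[' ∈ c :: t) ↔ ('[' ∈ t) := by
    simp [List.mem_cons]
    intro h'
    exact (h h'.symm).elim
  by_cases ht : '[' ∈ t
  · rw [if_pos (hm.mpr ht), if_pos ht, List.dropWhile_cons, if_pos (by simp [h])]
  · rw [if_neg (fun hx => ht (hm.mp hx)), if_neg ht]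

theorem tailCont_lb (t : List Char) : tailCont ('[' :: t) = '[' :: goKey [] t := by
  unfold tailCont
  rw [if_pos List.mem_cons_self]
  simp

theorem goOut_take (s : List Char) : goOut s = s.takeWhile (· ≠ '[') ++ tailCont s := by
  induction s with
  | nil => simp [goOut, tailCont]
  | cons c t ih =>
    by_cases hc : c = '['
    · subst hc
      rw [show goOut ('[' :: t) = '[' :: goKey [] t from by simp [goOut], tailCont_lb]
      simp
    · rw [show goOut (c :: t) = c :: goOut t from by simp [goOut, hc], ih,
        List.takeWhile_cons, if_pos (by simp [hc]), tailCont_cons c t hc]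
      simp

theorem goKeyVal_seg (n : Nat) : ∀ rest : List Char, rest.length ≤ n →
    (∀ k : List Char, (∀ a ∈ k, a ≠ '[' ∧ a ≠ ']' ∧ a ≠ '=') →
      goKey k rest = fixSeg (k ++ rest.takeWhile (· ≠ '[')) ++ tailCont rest) ∧
    (∀ k v : List Char, (∀ a ∈ k, a ≠ '[' ∧ a ≠ ']' ∧ a ≠ '=') → (∀ a ∈ v, a ≠ '[' ∧ a ≠ ']') →
      goVal k v rest = fixSeg (k ++ ['='] ++ v ++ rest.takeWhile (· ≠ '[')) ++ tailCont rest) := by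
  induction n with
  | zero =>
    intro rest hlen
    have hnil : rest = [] := List.eq_nil_of_length_eq_zero (by omega)
    subst hnil
    constructor
    · intro k hk
      rw [show goKey k [] = k from by simp [goKey]]
      simp only [List.takeWhile_nil, List.append_nil]
      rw [fixSeg_of_no_rb k (notRB k hk)]
      simp [tailCont]
    · intro k v hk hv
      rw [show goVal k v [] = k ++ ['='] ++ v from by simp [goVal]]
      have hnr : ']' ∉ k ++ ['='] ++ v ++ ([] : List Char).takeWhile (· ≠ '[') := by
        simp only [List.takeWhile_nil, List.append_nil, List.mem_append]
        rintro ((hm | hm) | hm)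
        · exact notRB k hk hm
        · simp at hm
        · exact (hv _ hm).2 rfl
      rw [fixSeg_of_no_rb _ hnr]
      simp [tailCont]
  | succ n ih =>
    intro rest hlen
    cases rest with
    | nil => exact ih [] (by simp)
    | cons c t =>
      have hlt : t.length ≤ n := by simp at hlen; omega
      constructor
      · intro k hk
        by_cases hc1 : c = '['
        · subst hc1
          rw [show goKey k ('[' :: t) = k ++ '[' :: goKey [] t from by simp [goKey],
            tailCont_lb]
          simp only [List.takeWhile_cons, decide_eq_true_eq, ne_eq, not_true_eq_false,
            decide_false, Bool.false_eq_true, if_false, List.append_nil]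
          rw [fixSeg_of_no_rb k (notRB k hk)]
        · by_cases hc2 : c = '='
          · subst hc2
            rw [show goKey k ('=' :: t) = goVal k [] t from by simp [goKey]]
            rw [(ih t hlt).2 k [] hk (by simp)]
            rw [List.takeWhile_cons, if_pos (by simp [hc1]), tailCont_cons _ _ hc1]
            simp
          · by_cases hc3 : c = ']'
            · subst hc3
              rw [show goKey k (']' :: t) = k ++ ']' :: goOut t from by simp [goKey]]
              rw [goOut_take]
              rw [List.takeWhile_cons, if_pos (by simp [hc1]), tailCont_cons _ _ hc1]
              have hmem : ']' ∈ k ++ ']' :: t.takeWhile (· ≠ '[') := by simp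
              rw [fixSeg, if_pos hmem]
              have hattr : (k ++ ']' :: t.takeWhile (· ≠ '[')).takeWhile (· ≠ ']') = k := by
                rw [takeWhile_append_all _ k _ (fun a ha => by simp [(hk a ha).2.1])]
                simp
              rw [hattr, if_neg (notEQ k hk)]
              simp
            · rw [show goKey k (c :: t) = goKey (k ++ [c]) t from by
                simp [goKey, hc1, hc2, hc3]]
              rw [(ih t hlt).1 (k ++ [c]) (by
                intro a ha
                rcases List.mem_append.mp ha with h | h
                · exact hk a h
                · simp at h; subst h; exact ⟨hc1, hc3, hc2⟩)]
              rw [List.takeWhile_cons, if_pos (by simp [hc1]), tailCont_cons _ _ hc1]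
              simp
      · intro k v hk hv
        by_cases hc1 : c = '['
        · subst hc1
          rw [show goVal k v ('[' :: t) = k ++ ['='] ++ v ++ '[' :: goKey [] t from by
            simp [goVal], tailCont_lb]
          rw [show List.takeWhile (fun x => decide ¬x = '[') ('[' :: t) = [] from by simp]
          have hnr : ']' ∉ k ++ ['='] ++ v := by
            simp only [List.mem_append]
            rintro ((hm | hm) | hm)
            · exact notRB k hk hm
            · simp at hm
            · exact (hv _ hm).2 rfl
          rw [List.append_nil, fixSeg_of_no_rb _ hnr]
        · by_cases hc3 : c = ']'
          · subst hc3
            rw [show goVal k v (']' :: t) =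
                k ++ ['='] ++ quoteIfNeededB v ++ ']' :: goOut t from by simp [goVal]]
            rw [goOut_take]
            rw [List.takeWhile_cons, if_pos (by simp [hc1]), tailCont_cons _ _ hc1]
            set w := t.takeWhile (· ≠ '[') with hw
            have hmem : ']' ∈ k ++ ['='] ++ v ++ ']' :: w := by simp
            rw [fixSeg, if_pos hmem]
            have hattr : (k ++ ['='] ++ v ++ ']' :: w).takeWhile (· ≠ ']')
                = k ++ ['='] ++ v := by
              rw [List.append_assoc, List.append_assoc,
                takeWhile_append_all _ k _ (fun a ha => by simp [(hk a ha).2.1])]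
              rw [show (['='] ++ (v ++ ']' :: w)) = '=' :: (v ++ ']' :: w) from rfl,
                List.takeWhile_cons, if_pos (by simp),
                takeWhile_append_all _ v _ (fun a ha => by simp [(hv a ha).2])]
              simp
            rw [hattr]
            have heq : '=' ∈ k ++ ['='] ++ v := by simp
            rw [if_pos heq]
            have hkey : (k ++ ['='] ++ v).takeWhile (· ≠ '=') = k := by
              rw [List.append_assoc, takeWhile_append_all _ k _
                (fun a ha => by simp [(hk a ha).2.2])]
              simp
            have hval : ((k ++ ['='] ++ v).dropWhile (· ≠ '=')).tail = v := by
              rw [List.append_assoc, dropWhile_append_all _ k _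
                (fun a ha => by simp [(hk a ha).2.2])]
              simp
            have hrest : ((k ++ ['='] ++ v ++ ']' :: w).dropWhile (· ≠ ']')).tail = w := by
              rw [List.append_assoc, List.append_assoc,
                dropWhile_append_all _ k _ (fun a ha => by simp [(hk a ha).2.1])]
              rw [show (['='] ++ (v ++ ']' :: w)) = '=' :: (v ++ ']' :: w) from rfl,
                List.dropWhile_cons, if_pos (by simp),
                dropWhile_append_all _ v _ (fun a ha => by simp [(hv a ha).2])]
              simp
            simp only [hkey, hval, hrest]
            simp
          · rw [show goVal k v (c :: t) = goVal k (v ++ [c]) t from by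
              simp [goVal, hc1, hc3]]
            rw [(ih t hlt).2 k (v ++ [c]) hk (by
              intro a ha
              rcases List.mem_append.mp ha with h | h
              · exact hv a h
              · simp at h; subst h; exact ⟨hc1, hc3⟩)]
            rw [List.takeWhile_cons, if_pos (by simp [hc1]), tailCont_cons _ _ hc1]
            simp

theorem goKey_join (n : Nat) : ∀ rest : List Char, rest.length ≤ n →
    '[' :: goKey [] rest = ['['] ++ PySem.Chars.join ['['] ((splitChar '[' rest).map fixSeg) := by
  induction n with
  | zero =>
    intro rest hlen
    have hnil : rest = [] := List.eq_nil_of_length_eq_zero (by omega)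
    subst hnil
    rw [splitChar_of_not_mem _ _ (by simp), List.map_cons, List.map_nil,
      PySem.Chars.join_singleton]
    rw [show goKey [] [] = [] from by simp [goKey], fixSeg_of_no_rb [] (by simp)]
    simp
  | succ n ih =>
    intro rest hlen
    have hK := (goKeyVal_seg rest.length rest le_rfl).1 [] (by simp)
    rw [List.nil_append] at hK
    by_cases hm : '[' ∈ rest
    · rw [splitChar_cons_of_mem _ _ hm, List.map_cons]
      have hlen' : ((rest.dropWhile (· ≠ '[')).tail).length ≤ n := by
        have h1 : (rest.dropWhile (· ≠ '[')).length ≤ rest.length :=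
          List.length_dropWhile_le _ _
        have h2 : rest.dropWhile (· ≠ '[') ≠ [] := dropWhile_ne_nil_of_mem '[' rest hm
        have h3 : 1 ≤ (rest.dropWhile (· ≠ '[')).length := List.length_pos_iff.mpr h2
        simp only [List.length_tail]
        omega
      cases hsc : (splitChar '[' ((rest.dropWhile (· ≠ '[')).tail)).map fixSeg with
      | nil => exact absurd (List.map_eq_nil_iff.mp hsc) (splitChar_ne_nil '[' _)
      | cons y ys =>
        rw [PySem.Chars.join_cons_cons, ← hsc]
        rw [hK]
        unfold tailCont
        rw [if_pos hm]
        rw [ih _ hlen']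
        simp
    · rw [splitChar_of_not_mem _ _ hm, List.map_cons, List.map_nil,
        PySem.Chars.join_singleton, hK]
      unfold tailCont
      rw [if_neg hm]
      rw [takeWhile_all_id _ rest (fun a ha => by
        simp
        intro he
        exact hm (he ▸ ha))]
      simp

theorem goOut_eq (s : List Char) :
    goOut s =
      PySem.Chars.join ['[']
        ((splitChar '[' s).headD [] :: ((splitChar '[' s).tail.map fixSeg)) := by
  by_cases hm : '[' ∈ s
  · rw [goOut_take, splitChar_cons_of_mem _ _ hm]
    simp only [List.headD_cons, List.tail_cons]
    unfold tailCont
    rw [if_pos hm]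
    rw [goKey_join _ _ le_rfl]
    cases hsc : (splitChar '[' ((s.dropWhile (· ≠ '[')).tail)).map fixSeg with
    | nil => exact absurd (List.map_eq_nil_iff.mp hsc) (splitChar_ne_nil '[' _)
    | cons y t =>
      rw [PySem.Chars.join_cons_cons, ← hsc]
      simp
  · rw [goOut_take, splitChar_of_not_mem _ _ hm]
    unfold tailCont
    rw [if_neg hm]
    rw [takeWhile_all_id _ s (fun a ha => by
      simp
      intro he
      exact hm (he ▸ ha))]
    simp [PySem.Chars.join_singleton]

theorem goOut_id_of_guard_false (sel : List Char)
    (hg : ¬ ('[' ∈ sel ∧ ']' ∈ sel ∧ '=' ∈ sel)) : goOut sel = sel := by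
  by_cases hm : '[' ∈ sel
  · have hmap : (splitChar '[' sel).tail.map fixSeg = (splitChar '[' sel).tail := by
      conv_rhs => rw [← List.map_id ((splitChar '[' sel).tail)]
      apply List.map_congr_left
      intro x hx
      show fixSeg x = x
      have hsub : ∀ a ∈ x, a ∈ sel :=
        splitChar_chars_subset '[' sel x (List.mem_of_mem_tail hx)
      rcases not_and_or.mp hg with h | h
      · exact (h hm).elim
      · rcases not_and_or.mp h with h' | h'
        · exact fixSeg_of_no_rb x (fun ha => h' (hsub _ ha))
        · exact fixSeg_of_no_eq x (fun ha => h' (hsub _ ha))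
    rw [goOut_eq, hmap]
    have hhd : (splitChar '[' sel).headD [] :: (splitChar '[' sel).tail = splitChar '[' sel := by
      cases h : splitChar '[' sel with
      | nil => exact (splitChar_ne_nil '[' sel h).elim
      | cons y ys => simp
    rw [hhd, join_splitChar]
  · rw [goOut_take]
    unfold tailCont
    rw [if_neg hm]
    rw [takeWhile_all_id _ sel (fun a ha => by
      simp
      intro he
      exact hm (he ▸ ha))]
    simp

theorem coreA_eq_goOut (sel : List Char) : coreA sel = goOut sel := by
  unfold coreA
  simp only [isIn_singleton]
  by_cases hg : '[' ∈ sel ∧ ']' ∈ sel ∧ '=' ∈ sel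
  · obtain ⟨h1, h2, h3⟩ := hg
    simp only [h1, h2, h3, decide_true, Bool.and_self, if_true]
    rw [splitOn_singleton]
    set ps := splitChar '[' sel with hps
    have hne : ps ≠ [] := splitChar_ne_nil '[' sel
    have hlen1 : 1 ≤ ps.length := List.length_pos_iff.mpr hne
    rw [loop_maps ps ps.length hlen1 le_rfl]
    rw [List.drop_length, List.append_nil]
    have htake : (ps.drop 1).take (ps.length - 1) = ps.tail := by
      rw [List.drop_one]
      exact List.take_of_length_le (by simp)
    rw [htake]
    have hmapeq : ps.tail.map fixPartA = ps.tail.map fixSeg :=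
      List.map_congr_left (fun x _ => fixPartA_eq_fixSeg x)
    rw [hmapeq, goOut_eq]
    cases h : ps with
    | nil => exact (hne h).elim
    | cons y ys =>
      rw [← hps, h]
      simp
  · have hgb : (decide ('[' ∈ sel) && decide (']' ∈ sel) && decide ('=' ∈ sel)) = false := by
      rcases not_and_or.mp hg with h | h
      · simp [h]
      · rcases not_and_or.mp h with h' | h' <;> simp [h']
    rw [hgb]
    simp only [Bool.false_eq_true, if_false]
    exact (goOut_id_of_guard_false sel hg).symm

-- ---------- B's foldl machine equals the reference automaton ----------

theorem foldl_fsm (s : List Char) : ∀ (acc k v : List Char),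
    fsmFinishB (s.foldl fsmStepB (acc, 0, k, v)) = acc ++ goOut s ∧
    fsmFinishB (s.foldl fsmStepB (acc, 1, k, v)) = acc ++ goKey k s ∧
    fsmFinishB (s.foldl fsmStepB (acc, 2, k, v)) = acc ++ goVal k v s := by
  induction s with
  | nil =>
    intro acc k v
    refine ⟨?_, ?_, ?_⟩ <;> simp [fsmFinishB, goOut, goKey, goVal]
  | cons c t ih =>
    intro acc k v
    refine ⟨?_, ?_, ?_⟩
    · rw [List.foldl_cons]
      by_cases hc : c = '['
      · subst hc
        rw [show fsmStepB (acc, 0, k, v) '[' = (acc ++ ['['], 1, [], v) from by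
          simp [fsmStepB]]
        rw [(ih (acc ++ ['[']) [] v).2.1]
        simp [goOut]
      · rw [show fsmStepB (acc, 0, k, v) c = (acc ++ [c], 0, k, v) from by
          simp [fsmStepB, hc]]
        rw [(ih (acc ++ [c]) k v).1]
        simp [goOut, hc]
    · rw [List.foldl_cons]
      by_cases hc1 : c = '['
      · subst hc1
        rw [show fsmStepB (acc, 1, k, v) '[' = (acc ++ k ++ ['['], 1, [], v) from by
          simp [fsmStepB]]
        rw [(ih (acc ++ k ++ ['[']) [] v).2.1]
        simp [goKey]
      · by_cases hc2 : c = '='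
        · subst hc2
          rw [show fsmStepB (acc, 1, k, v) '=' = (acc, 2, k, []) from by
            simp [fsmStepB, hc1]]
          rw [(ih acc k []).2.2]
          simp [goKey, hc1]
        · by_cases hc3 : c = ']'
          · subst hc3
            rw [show fsmStepB (acc, 1, k, v) ']' = (acc ++ k ++ [']'], 0, k, v) from by
              simp [fsmStepB, hc1, hc2]]
            rw [(ih (acc ++ k ++ [']']) k v).1]
            simp [goKey, hc1, hc2]
          · rw [show fsmStepB (acc, 1, k, v) c = (acc, 1, k ++ [c], v) from by
              simp [fsmStepB, hc1, hc2, hc3]]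
            rw [(ih acc (k ++ [c]) v).2.1]
            simp [goKey, hc1, hc2, hc3]
    · rw [List.foldl_cons]
      by_cases hc1 : c = '['
      · subst hc1
        rw [show fsmStepB (acc, 2, k, v) '[' = (acc ++ k ++ ['='] ++ v ++ ['['], 1, [], v) from by
          simp [fsmStepB]]
        rw [(ih (acc ++ k ++ ['='] ++ v ++ ['[']) [] v).2.1]
        simp [goVal]
      · by_cases hc3 : c = ']'
        · subst hc3
          rw [show fsmStepB (acc, 2, k, v) ']'
              = (acc ++ k ++ ['='] ++ quoteIfNeededB v ++ [']'], 0, k, v) from by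
            simp [fsmStepB, hc1]]
          rw [(ih (acc ++ k ++ ['='] ++ quoteIfNeededB v ++ [']']) k v).1]
          simp [goVal, hc1]
        · rw [show fsmStepB (acc, 2, k, v) c = (acc, 2, k, v ++ [c]) from by
            simp [fsmStepB, hc1, hc3]]
          rw [(ih acc k (v ++ [c])).2.2]
          simp [goVal, hc1, hc3]

theorem fixB_eq_goOut (s : List Char) : fixB s = goOut s := by
  have h := (foldl_fsm s [] [] []).1
  simpa [fixB] using h

-- ===== VERDICT (by name: the statement is the Claim_ definition above) =====
theorem validate_selectors_spec : Claim_equal_validate_selectors := by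
  intro selectors _
  unfold Spec_validate_selectors
  rw [validate_selectors_eq_core, validate_selectors_alt]
  rw [PySem.List.foldl_append_singleton_eq_map]
  simp only [List.nil_append]
  exact List.map_congr_left (fun s _ => by rw [coreA_eq_goOut, fixB_eq_goOut])
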